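-- pv_equiv track=rewrite | github.com/UTNuclearRobotics/robofleet_client | robofleet_client/generate/msg2fbs/msg2fbs.py | gen_base_schema
-- ===== SOURCE A (Python) =====
-- def gen_metadata_item(base_ns):
--     """ Generate a table field containing a MsgMetadata. """
--     yield "  __metadata:{}.MsgMetadata;".format(base_ns)
--
-- def gen_base_schema(base_ns):
--     """ Generate supporting definitions """
--     yield "// *** begin supporting definitions ***"
--     # Namespace everything
--     yield "namespace {};".format(base_ns)
--
--     # Metadata table for all messages, to support RoboFleet
--     yield "table MsgMetadata {"
--     yield "  type:string;"
--     yield "  topic:string;"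
--     yield "}"
--
--     # All generated messages can be read as MsgWithMetadata to access metadata
--     yield "table MsgWithMetadata {"
--     for x in gen_metadata_item(base_ns):
--         yield x
--     yield "}"
--
--     yield "table RobofleetSubscription {"
--     for x in gen_metadata_item(base_ns):
--       yield x
--     yield "  topic_regex:string;"
--     yield "  action:uint8;"
--     yield "}"
--     yield "// *** end supporting definitions ***"
-- ===== SOURCE B (Python) =====
-- def gen_base_schema(base_ns):
--     """ Generate supporting definitions """
--     metadata_field = "__metadata:{}.MsgMetadata;".format(base_ns)
--     tables = [
--         ("MsgMetadata", ["type:string;", "topic:string;"]),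
--         ("MsgWithMetadata", [metadata_field]),
--         ("RobofleetSubscription", [metadata_field, "topic_regex:string;", "action:uint8;"]),
--     ]
--     lines = ["// *** begin supporting definitions ***",
--              "namespace {};".format(base_ns)]
--     for name, fields in tables:
--         lines.append("table " + name + " {")
--         for f in fields:
--             lines.append("  " + f)
--         lines.append("}")
--     lines.append("// *** end supporting definitions ***")
--     yield from lines
-- ===== Notes on version B (the rewrite author's own statement) =====
-- stated objective: alternative
-- what changed: B represents the schema as data (a list of table-name/field-list pairs) and renders it with a generic nested loop that emits each table header, its indented fields and the closing brace, instead of A's hard-coded statement-by-statement yields with a helper generator.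
import Mathlib
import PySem

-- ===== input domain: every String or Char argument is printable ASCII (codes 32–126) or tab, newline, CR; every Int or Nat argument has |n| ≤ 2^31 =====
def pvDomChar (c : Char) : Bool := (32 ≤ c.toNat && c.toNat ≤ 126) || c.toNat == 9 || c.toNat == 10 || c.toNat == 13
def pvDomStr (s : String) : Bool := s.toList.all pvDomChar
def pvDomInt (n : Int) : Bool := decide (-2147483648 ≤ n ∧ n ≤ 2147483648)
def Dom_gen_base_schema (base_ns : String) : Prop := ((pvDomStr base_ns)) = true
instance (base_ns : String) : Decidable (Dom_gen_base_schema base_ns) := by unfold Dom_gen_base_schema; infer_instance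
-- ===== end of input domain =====

-- B renders the schema from a (table name, fields) data list with a generic nested rendering loop, instead of A's hard-coded yields — alternative decomposition, same output.


-- ===== PORT A =====
-- helper generator: yields the single metadata field line
def gen_metadata_item (base_ns : String) : List String :=
  ["  __metadata:" ++ base_ns ++ ".MsgMetadata;"]

def gen_base_schema (base_ns : String) : List String :=
  ["// *** begin supporting definitions ***"]
  ++ ["namespace " ++ base_ns ++ ";"]
  ++ ["table MsgMetadata {", "  type:string;", "  topic:string;", "}"]
  ++ ["table MsgWithMetadata {"]
  ++ gen_metadata_item base_ns          -- for x in gen_metadata_item(base_ns): yield x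
  ++ ["}"]
  ++ ["table RobofleetSubscription {"]
  ++ gen_metadata_item base_ns          -- for x in gen_metadata_item(base_ns): yield x
  ++ ["  topic_regex:string;", "  action:uint8;", "}"]
  ++ ["// *** end supporting definitions ***"]

-- ===== PORT B =====
def gen_base_schema_alt (base_ns : String) : List String :=
  let metadata_field := "__metadata:" ++ base_ns ++ ".MsgMetadata;"
  let tables : List (String × List String) :=
    [ ("MsgMetadata", ["type:string;", "topic:string;"]),
      ("MsgWithMetadata", [metadata_field]),
      ("RobofleetSubscription", [metadata_field, "topic_regex:string;", "action:uint8;"]) ]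
  let lines :=
    tables.foldl
      (fun acc t =>
        (acc ++ ["table " ++ t.1 ++ " {"])
          ++ t.2.foldl (fun acc2 f => acc2 ++ ["  " ++ f]) []
          ++ ["}"])
      ["// *** begin supporting definitions ***", "namespace " ++ base_ns ++ ";"]
  lines ++ ["// *** end supporting definitions ***"]

-- ===== PRECONDITION & SPEC =====
def Spec_gen_base_schema (base_ns : String) (out : List String) : Prop := out = gen_base_schema_alt base_ns
instance (base_ns : String) (out : List String) : Decidable (Spec_gen_base_schema base_ns out) := by unfold Spec_gen_base_schema; infer_instance

-- ===== CLAIM =====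
def Claim_equal_gen_base_schema : Prop := ∀ (base_ns : String), Dom_gen_base_schema base_ns → Spec_gen_base_schema base_ns (gen_base_schema base_ns)

-- ===== LEMMAS AND PROOFS =====

-- ===== VERDICT =====
theorem gen_base_schema_spec : Claim_equal_gen_base_schema := by
  intro base_ns _
  unfold Spec_gen_base_schema gen_base_schema gen_base_schema_alt gen_metadata_item
  simp [List.foldl, ← String.append_assoc]
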